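-- pv_equiv track=rewrite | github.com/NikitinTimofey/LabsPython | lab4/lab4_7.1b.py | generate_access_config
-- ===== SOURCE A (Python) =====
-- def generate_access_config(access, psecurity = False):
--     """
--     access - словарь access-портов,
--     для которых необходимо сгенерировать конфигурацию, вида:
--     { 'FastEthernet0/12':10,
--       'FastEthernet0/14':11,
--       'FastEthernet0/16':17 }
--     psecurity - контролирует нужна ли настройка Port Security. По умолчанию значение False
--     - если значение True, то настройка выполняется с добавлением шаблона port_security
--     - если значение False, то настройка не выполняется
--     Функция возвращает словарь:
--     - ключи: имена интерфейсов, вида 'FastEthernet0/1'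
--     - значения: список команд, который надо выполнить на этом интерфейсе
--     """
--     access_template = [
--         'switchport mode access',
--         'switchport access vlan',
--         'switchport nonegotiate',
--         'spanning-tree portfast',
--         'spanning-tree bpduguard enable'
--     ]
--
--     port_security = [
--         'switchport port-security maximum 2',
--         'switchport port-security violation restrict',
--         'switchport port-security'
--     ]
--
--     result = {}
--     for interface, vlan in access.items():
--         commands = []
--         for command in access_template:
--             if 'access vlan' in command:
--                 commands.append(f"{command} {vlan}")
--             else:
--                 commands.append(command)
--         if psecurity:
--             commands.extend(port_security)
--         result[interface] = commands
--
--     return result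
-- ===== SOURCE B (Python) =====
-- def generate_access_config(access, psecurity=False):
--     """Staged, column-wise construction: first give every interface its two
--     interface-specific lines, then append the shared static tail (computed
--     once, including port-security when requested) to every list."""
--     result = {interface: [] for interface in access}
--     for interface, vlan in access.items():
--         result[interface].append('switchport mode access')
--         result[interface].append(f'switchport access vlan {vlan}')
--     static = [
--         'switchport nonegotiate',
--         'spanning-tree portfast',
--         'spanning-tree bpduguard enable',
--     ]
--     if psecurity:
--         static += [
--             'switchport port-security maximum 2',
--             'switchport port-security violation restrict',
--             'switchport port-security',
--         ]
--     for commands in result.values():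
--         commands.extend(static)
--     return result
-- ===== Notes on version B (the rewrite author's own statement) =====
-- stated objective: alternative
-- what changed: B builds the configs column-wise in stages instead of A's row-wise inner template loop with a substring test: every interface first gets its two interface-specific lines, then one shared static tail (built once, port-security included when requested) is appended to every interface's list.
import Mathlib
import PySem

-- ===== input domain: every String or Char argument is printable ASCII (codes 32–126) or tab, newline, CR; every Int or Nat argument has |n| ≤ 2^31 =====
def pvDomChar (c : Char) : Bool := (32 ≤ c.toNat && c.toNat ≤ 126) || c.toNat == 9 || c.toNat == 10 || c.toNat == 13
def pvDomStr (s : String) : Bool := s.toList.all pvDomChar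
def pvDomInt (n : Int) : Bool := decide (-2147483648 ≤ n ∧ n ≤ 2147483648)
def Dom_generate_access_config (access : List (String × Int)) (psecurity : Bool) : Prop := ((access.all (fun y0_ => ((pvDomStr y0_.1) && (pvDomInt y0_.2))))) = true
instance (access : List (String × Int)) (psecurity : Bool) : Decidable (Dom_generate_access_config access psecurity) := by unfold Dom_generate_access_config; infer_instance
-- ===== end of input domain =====

-- B builds the configs in stages (per-interface head lines first, then one shared
-- static tail appended to every list) instead of A's per-interface template loop
-- with a substring test; objective: alternative decomposition, same cost.

-- ===== PORT A =====
def gacTemplate : List String :=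
  [ "switchport mode access",
    "switchport access vlan",
    "switchport nonegotiate",
    "spanning-tree portfast",
    "spanning-tree bpduguard enable" ]

def gacPortSecurity : List String :=
  [ "switchport port-security maximum 2",
    "switchport port-security violation restrict",
    "switchport port-security" ]

def generate_access_config (access : List (String × Int)) (psecurity : Bool) : List (String × List String) :=
  (access.foldl
    (fun (result : PySem.Dict String (List String)) p =>
      let commands := gacTemplate.foldl
        (fun cs command =>
          if PySem.Str.isIn "access vlan" command then
            cs ++ [command ++ " " ++ PySem.Int.toStr p.2]
          else
            cs ++ [command]) []
      let commands := if psecurity then commands ++ gacPortSecurity else commands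
      result.insert p.1 commands)
    PySem.Dict.empty).items

-- ===== PORT B =====
-- static tail: three fixed lines, extended by the port-security lines when requested
def gacStatic (psecurity : Bool) : List String :=
  let static :=
    [ "switchport nonegotiate",
      "spanning-tree portfast",
      "spanning-tree bpduguard enable" ]
  if psecurity then
    static ++
      [ "switchport port-security maximum 2",
        "switchport port-security violation restrict",
        "switchport port-security" ]
  else static

def generate_access_config_alt (access : List (String × Int)) (psecurity : Bool) : List (String × List String) :=
  -- `access` is a Python dict; PySem.Dict.ofList recovers the dict the assoc list models
  -- (first position, last value), so B's iterations over the dict are exact.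
  let d := PySem.Dict.ofList access
  -- result = {interface: [] for interface in access}
  let result := d.keys.foldl
    (fun (r : PySem.Dict String (List String)) interface => r.insert interface []) PySem.Dict.empty
  -- for interface, vlan in access.items(): two appends
  let result := d.items.foldl
    (fun (r : PySem.Dict String (List String)) p =>
      (r.modify p.1 [] (fun cs => cs ++ ["switchport mode access"])).modify p.1 []
        (fun cs => cs ++ ["switchport access vlan " ++ PySem.Int.toStr p.2])) result
  -- for commands in result.values(): commands.extend(static)  (in-place: one modify per key)
  let result := result.keys.foldl
    (fun (r : PySem.Dict String (List String)) k => r.modify k [] (fun cs => cs ++ gacStatic psecurity)) result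
  result.items

-- ===== PRECONDITION & SPEC =====
def Spec_generate_access_config (access : List (String × Int)) (psecurity : Bool) (out : List (String × List String)) : Prop := out = generate_access_config_alt access psecurity
instance (access : List (String × Int)) (psecurity : Bool) (out : List (String × List String)) : Decidable (Spec_generate_access_config access psecurity out) := by unfold Spec_generate_access_config; infer_instance

-- ===== CLAIM (what is proved, stated in full; the proofs are below) =====
def Claim_equal_generate_access_config : Prop := ∀ (access : List (String × Int)) (psecurity : Bool), Dom_generate_access_config access psecurity → Spec_generate_access_config access psecurity (generate_access_config access psecurity)

-- ===== LEMMAS AND PROOFS =====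

-- the head lines B gives an interface
def gacHead (vlan : Int) : List String :=
  ["switchport mode access", "switchport access vlan " ++ PySem.Int.toStr vlan]

-- the full command list both programs produce for a vlan
def gacCmds (psecurity : Bool) (vlan : Int) : List String := gacHead vlan ++ gacStatic psecurity

-- A's inner loop (plus its port-security extension) produces exactly gacCmds
theorem gac_commands_eq (psecurity : Bool) (vlan : Int) :
    (let commands := gacTemplate.foldl
        (fun cs command =>
          if PySem.Str.isIn "access vlan" command then
            cs ++ [command ++ " " ++ PySem.Int.toStr vlan]
          else
            cs ++ [command]) []
     if psecurity then commands ++ gacPortSecurity else commands) = gacCmds psecurity vlan := by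
  have h1 : PySem.Str.isIn "access vlan" "switchport mode access" = false := by decide
  have h2 : PySem.Str.isIn "access vlan" "switchport access vlan" = true := by decide
  have h3 : PySem.Str.isIn "access vlan" "switchport nonegotiate" = false := by decide
  have h4 : PySem.Str.isIn "access vlan" "spanning-tree portfast" = false := by decide
  have h5 : PySem.Str.isIn "access vlan" "spanning-tree bpduguard enable" = false := by decide
  simp only [gacTemplate, List.foldl, h1, h2, h3, h4, h5, if_true]
  cases psecurity <;> rfl

-- A's fold, pointwise: keys follow the plain dict fold, values are gacCmds of its values
theorem gac_A_rel (psecurity : Bool) (l : List (String × Int))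
    (e : PySem.Dict String (List String)) (d : PySem.Dict String Int)
    (hk : e.keys = d.keys)
    (hg : ∀ k, e.get? k = (d.get? k).map (gacCmds psecurity)) :
    (l.foldl (fun e p => e.insert p.1 (gacCmds psecurity p.2)) e).keys
      = (l.foldl (fun d p => d.insert p.1 p.2) d).keys
    ∧ ∀ k, (l.foldl (fun e p => e.insert p.1 (gacCmds psecurity p.2)) e).get? k
      = ((l.foldl (fun d p => d.insert p.1 p.2) d).get? k).map (gacCmds psecurity) := by
  induction l generalizing e d with
  | nil => exact ⟨hk, hg⟩
  | cons p l ih =>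
    apply ih
    · have hc : e.contains p.1 = d.contains p.1 := by
        rw [PySem.Dict.contains_eq_decide_mem_keys, PySem.Dict.contains_eq_decide_mem_keys, hk]
      by_cases h : d.contains p.1 = true
      · rw [PySem.Dict.keys_insert_of_contains _ _ (hc.trans h),
            PySem.Dict.keys_insert_of_contains _ _ h, hk]
      · rw [PySem.Dict.keys_insert_of_not_contains _ _ (by rw [hc]; exact Bool.eq_false_iff.mpr h),
            PySem.Dict.keys_insert_of_not_contains _ _ (Bool.eq_false_iff.mpr h), hk]
    · intro k
      rw [PySem.Dict.get?_insert, PySem.Dict.get?_insert]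
      by_cases h : k = p.1
      · simp [h]
      · simp [h, hg k]

-- two modifies per item: getD accumulates the head lines of the matching items
theorem gac_fold2_getD (l : List (String × Int)) (r : PySem.Dict String (List String)) (k : String) :
    (l.foldl (fun r p =>
        (r.modify p.1 [] (fun cs => cs ++ ["switchport mode access"])).modify p.1 []
          (fun cs => cs ++ ["switchport access vlan " ++ PySem.Int.toStr p.2])) r).getD k []
    = r.getD k [] ++ (l.filter (fun p => p.1 == k)).flatMap (fun p => gacHead p.2) := by
  induction l generalizing r with
  | nil => simp
  | cons p l ih =>
    simp only [List.foldl_cons, ih, List.filter_cons]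
    by_cases h : p.1 = k
    · subst h
      simp [gacHead]
    · have hne : (p.1 == k) = false := by simp [h]
      simp [PySem.Dict.getD_modify, Ne.symm h, hne]

-- the two-modify fold does not add keys when every touched key is already present
theorem gac_fold2_keys (l : List (String × Int)) (r : PySem.Dict String (List String))
    (h : ∀ p ∈ l, p.1 ∈ r.keys) :
    (l.foldl (fun r p =>
        (r.modify p.1 [] (fun cs => cs ++ ["switchport mode access"])).modify p.1 []
          (fun cs => cs ++ ["switchport access vlan " ++ PySem.Int.toStr p.2])) r).keys = r.keys := by
  induction l generalizing r with
  | nil => rfl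
  | cons p l ih =>
    have hc : r.contains p.1 = true := by
      rw [PySem.Dict.contains_eq_decide_mem_keys]; exact decide_eq_true (h p (by simp))
    have hk1 : (r.modify p.1 [] (fun cs => cs ++ ["switchport mode access"])).keys = r.keys := by
      rw [PySem.Dict.keys_modify, PySem.Dict.keys_insert_of_contains _ _ hc]
    have hc2 : (r.modify p.1 [] (fun cs => cs ++ ["switchport mode access"])).contains p.1 = true := by
      rw [PySem.Dict.contains_eq_decide_mem_keys, hk1, ← PySem.Dict.contains_eq_decide_mem_keys]
      exact hc
    have hk2 : ((r.modify p.1 [] (fun cs => cs ++ ["switchport mode access"])).modify p.1 []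
        (fun cs => cs ++ ["switchport access vlan " ++ PySem.Int.toStr p.2])).keys = r.keys := by
      rw [PySem.Dict.keys_modify, PySem.Dict.keys_insert_of_contains _ _ hc2, hk1]
    simp only [List.foldl_cons]
    rw [ih _ (by intro q hq; rw [hk2]; exact h q (by simp [hq]))]
    exact hk2

-- appending the static tail along a Nodup key list: each present key gets it once
theorem gac_fold3_getD (static : List String) (ks : List String)
    (r : PySem.Dict String (List String)) (k : String) (hnd : ks.Nodup) :
    (ks.foldl (fun r k' => r.modify k' [] (fun cs => cs ++ static)) r).getD k []
    = if k ∈ ks then r.getD k [] ++ static else r.getD k [] := by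
  induction ks generalizing r with
  | nil => simp
  | cons a ks ih =>
    simp only [List.foldl_cons]
    rw [ih _ (List.Nodup.of_cons hnd)]
    by_cases h : k = a
    · subst h
      have : k ∉ ks := (List.nodup_cons.mp hnd).1
      simp [this]
    · by_cases h2 : k ∈ ks <;> simp [h, h2, PySem.Dict.getD_modify]

-- a filter by key on a list whose keys are Nodup returns exactly the one matching item
theorem gac_filter_eq_singleton {l : List (String × Int)} {k : String} {v : Int}
    (hnd : (l.map Prod.fst).Nodup) (hm : (k, v) ∈ l) :
    l.filter (fun p => p.1 == k) = [(k, v)] := by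
  induction l with
  | nil => cases hm
  | cons p l ih =>
    simp only [List.map_cons, List.nodup_cons] at hnd
    rcases List.mem_cons.mp hm with h | h
    · subst h
      have : l.filter (fun p => p.1 == k) = [] := by
        apply List.filter_eq_nil_iff.mpr
        intro q hq
        simp only [beq_iff_eq]
        intro hqk
        have hq1 : q.1 ∈ l.map Prod.fst := List.mem_map_of_mem hq
        rw [hqk] at hq1
        exact hnd.1 hq1
      simp [this]
    · have hne : (p.1 == k) = false := by
        simp only [beq_eq_false_iff_ne]
        intro hpk
        exact hnd.1 (hpk ▸ List.mem_map_of_mem h)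
      simp [hne, ih hnd.2 h]

-- ===== VERDICT (by name: the statement is the Claim_ definition above) =====
-- the central equality, stated over the dict the assoc list models
theorem gac_main (access : List (String × Int)) (psecurity : Bool) :
    generate_access_config access psecurity = generate_access_config_alt access psecurity := by
  unfold generate_access_config generate_access_config_alt
  -- name the dict and the intermediate stages
  set d : PySem.Dict String Int := PySem.Dict.ofList access with hd
  have hndd : d.keys.Nodup := PySem.Dict.nodup_keys_ofList access
  -- ---- A side ----
  have hstep : (fun (result : PySem.Dict String (List String)) (p : String × Int) =>
      let commands := gacTemplate.foldl
        (fun cs command =>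
          if PySem.Str.isIn "access vlan" command then
            cs ++ [command ++ " " ++ PySem.Int.toStr p.2]
          else
            cs ++ [command]) []
      let commands := if psecurity then commands ++ gacPortSecurity else commands
      result.insert p.1 commands)
      = (fun (result : PySem.Dict String (List String)) p => result.insert p.1 (gacCmds psecurity p.2)) := by
    funext r p
    exact congrArg (r.insert p.1) (gac_commands_eq psecurity p.2)
  rw [hstep]
  have hfoldd : access.foldl (fun d p => d.insert p.1 p.2) PySem.Dict.empty = d := rfl
  obtain ⟨hkA, hgA⟩ := gac_A_rel psecurity access PySem.Dict.empty PySem.Dict.empty rfl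
    (by intro k; simp [PySem.Dict.get?_empty])
  rw [hfoldd] at hkA hgA
  set A : PySem.Dict String (List String) :=
    access.foldl (fun e p => e.insert p.1 (gacCmds psecurity p.2)) PySem.Dict.empty with hA
  -- ---- B side, stage 1 ----
  set r1 : PySem.Dict String (List String) :=
    d.keys.foldl (fun r interface => r.insert interface []) PySem.Dict.empty with hr1
  have hitems1 : r1.items = d.keys.map (fun i => (i, ([] : List String))) := by
    have := PySem.Dict.items_foldl_insert_fresh d.keys (fun i => i) (fun _ => ([] : List String))
      PySem.Dict.empty (by intro a _; exact PySem.Dict.contains_empty a) (by simpa using hndd)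
    simpa using this
  have hk1 : r1.keys = d.keys := by
    show r1.items.map (fun p => p.1) = d.keys
    rw [hitems1, List.map_map]
    exact List.map_id d.keys
  have hnd1 : r1.keys.Nodup := hk1 ▸ hndd
  have hg1 : ∀ k, r1.getD k [] = [] := by
    intro k
    by_cases h : k ∈ r1.keys
    · have hkd : k ∈ d.keys := hk1 ▸ h
      have hm : (k, ([] : List String)) ∈ r1.items := by
        rw [hitems1]; exact List.mem_map_of_mem hkd
      exact PySem.Dict.getD_of_mem_items r1 hm hnd1 []
    · refine PySem.Dict.getD_of_not_contains r1 [] ?_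
      rw [PySem.Dict.contains_eq_decide_mem_keys]
      exact decide_eq_false h
  -- ---- stage 2 ----
  set r2 : PySem.Dict String (List String) :=
    d.items.foldl (fun r p =>
      (r.modify p.1 [] (fun cs => cs ++ ["switchport mode access"])).modify p.1 []
        (fun cs => cs ++ ["switchport access vlan " ++ PySem.Int.toStr p.2])) r1 with hr2
  have hk2 : r2.keys = d.keys := by
    rw [hr2, gac_fold2_keys d.items r1
      (by intro p hp; rw [hk1]; exact PySem.Dict.mem_keys_of_mem_items d hp), hk1]
  have hnd2 : r2.keys.Nodup := hk2 ▸ hndd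
  have hg2 : ∀ k, r2.getD k []
      = (d.items.filter (fun p => p.1 == k)).flatMap (fun p => gacHead p.2) := by
    intro k
    rw [hr2, gac_fold2_getD, hg1]
    simp
  -- ---- stage 3 ----
  set r3 : PySem.Dict String (List String) :=
    r2.keys.foldl (fun r k => r.modify k [] (fun cs => cs ++ gacStatic psecurity)) r2 with hr3
  have hk3 : r3.keys = d.keys := by
    rw [hr3, PySem.Dict.keys_foldl_modify r2.keys [] (fun _ _ => (fun cs => cs ++ gacStatic psecurity)) r2]
    rw [PySem.Set.update_eq_append_filter]
    have hf : (PySem.Set.ofList r2.keys).filter (fun y => !PySem.Set.contains r2.keys y) = [] := by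
      apply List.filter_eq_nil_iff.mpr
      intro y hy
      have hmem : y ∈ r2.keys := (PySem.Set.mem_ofList _ _).mp hy
      simpa using hmem
    rw [hf, List.append_nil, hk2]
  have hg3 : ∀ k, k ∈ d.keys → r3.getD k [] = r2.getD k [] ++ gacStatic psecurity := by
    intro k hk
    rw [hr3, gac_fold3_getD _ _ _ _ hnd2, if_pos (hk2 ▸ hk)]
  -- ---- assemble ----
  have hndA : A.keys.Nodup := hkA ▸ hndd
  have hnd3 : r3.keys.Nodup := hk3 ▸ hndd
  rw [PySem.Dict.items_eq_map_keys A hndA [], PySem.Dict.items_eq_map_keys r3 hnd3 [], hkA, hk3]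
  apply List.map_congr_left
  intro k hk
  have hsome : ∃ v, d.get? k = some v := by
    rcases h : d.get? k with _ | v
    · exact absurd hk ((PySem.Dict.get?_eq_none_iff_not_mem_keys d k).mp h)
    · exact ⟨v, rfl⟩
  obtain ⟨v, hv⟩ := hsome
  have hAv : A.getD k [] = gacCmds psecurity v := by
    rw [PySem.Dict.getD_eq_get?_getD, hgA k, hv]
    rfl
  have hmem : (k, v) ∈ d.items := PySem.Dict.mem_items_of_get?_eq_some d hv
  have hndfst : (d.items.map Prod.fst).Nodup := hndd
  have hfilter : d.items.filter (fun p => p.1 == k) = [(k, v)] :=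
    gac_filter_eq_singleton hndfst hmem
  have hBv : r3.getD k [] = gacCmds psecurity v := by
    rw [hg3 k hk, hg2 k, hfilter]
    simp [gacCmds]
  rw [hAv, hBv]

-- ===== VERDICT (by name: the statement is the Claim_ definition above) =====
theorem generate_access_config_spec : Claim_equal_generate_access_config := by
  intro access psecurity _
  exact gac_main access psecurity
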